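-- pv_equiv track=rewrite | github.com/Cioscos/ASCII-Video-Player | terminal_old.py | generate_calibration_frame
-- ===== SOURCE A (Python) =====
-- def generate_calibration_frame(width, height):
--     """
--     Genera un frame ASCII di calibrazione tutto bianco, con un bordo e una croce centrale.
--
--     Args:
--         width (int): Larghezza dell'output ASCII.
--         height (int): Altezza dell'output ASCII.
--
--     Returns:
--         str: Stringa ASCII con il frame bianco, bordi e croce centrale.
--     """
--     # Caratteri
--     BORDER_CHAR = "#"
--     CROSS_CHAR = "+"
--     WHITE_CHAR = "█"  # Blocchi pieni per simulare un frame bianco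
--
--     # Crea una matrice di caratteri bianchi
--     # Ottimizzazione: pre-allocazione delle stringhe di riga
--     rows = [BORDER_CHAR * width]
--
--     # Riga superiore (bordo)
--
--     # Righe intermedie
--     for y in range(1, height-1):
--         if y == height // 2:
--             # Riga centrale con croce
--             row = BORDER_CHAR + CROSS_CHAR * (width-2) + BORDER_CHAR
--         else:
--             # Riga normale con bordi
--             row = BORDER_CHAR + WHITE_CHAR * (width-2) + BORDER_CHAR
--         rows.append(row)
--
--     # Riga inferiore (bordo)
--     if height > 1:
--         rows.append(BORDER_CHAR * width)
--
--     # Sovrascrivere la croce verticale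
--     center_x = width // 2
--     for y in range(1, height-1):
--         if y != height // 2:  # Salta la riga centrale (già con croce)
--             row_list = list(rows[y])
--             row_list[center_x] = CROSS_CHAR
--             rows[y] = "".join(row_list)
--
--     return "\n".join(rows)
-- ===== SOURCE B (Python) =====
-- def generate_calibration_frame(width, height):
--     """One pass: each interior row is produced by a row-maker that patches the
--     vertical cross in while the row is built (no second pass over finished rows)."""
--     BORDER_CHAR = "#"
--     CROSS_CHAR = "+"
--     WHITE_CHAR = "\u2588"
--     border = BORDER_CHAR * width
--     cy = height // 2
--     cx = width // 2
--
--     def interior(y):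
--         if y == cy:
--             return BORDER_CHAR + CROSS_CHAR * (width - 2) + BORDER_CHAR
--         cells = list(BORDER_CHAR + WHITE_CHAR * (width - 2) + BORDER_CHAR)
--         cells[cx] = CROSS_CHAR
--         return "".join(cells)
--
--     lines = [border] + [interior(y) for y in range(1, height - 1)] + ([border] if height > 1 else [])
--     return "\n".join(lines)
-- ===== Notes on version B (the rewrite author's own statement) =====
-- stated objective: simpler
-- what changed: B builds the frame in one pass: a row-maker function patches the vertical cross into each interior row as it is built and the lines list is assembled by a single comprehension, instead of A's append loop followed by a second loop that re-reads and rewrites finished rows in the list.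
import Mathlib
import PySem

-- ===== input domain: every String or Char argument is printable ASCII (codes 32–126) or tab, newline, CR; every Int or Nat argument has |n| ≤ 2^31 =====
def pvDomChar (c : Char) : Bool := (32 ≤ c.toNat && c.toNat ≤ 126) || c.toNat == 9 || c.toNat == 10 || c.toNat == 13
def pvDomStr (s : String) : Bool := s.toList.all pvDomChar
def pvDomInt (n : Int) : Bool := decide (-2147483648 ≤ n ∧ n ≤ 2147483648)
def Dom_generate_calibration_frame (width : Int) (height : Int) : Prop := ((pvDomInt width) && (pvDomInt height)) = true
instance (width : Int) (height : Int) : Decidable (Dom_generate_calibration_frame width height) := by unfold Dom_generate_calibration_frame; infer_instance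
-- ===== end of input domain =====

-- B builds the frame in one pass: the vertical cross is patched into each interior row
-- as the row is built, instead of A's second loop that rewrites finished rows; simpler.
-- Rows are represented as their code-point lists (PySem.Chars convention) and joined at the end.

-- ===== PORT A =====
def generate_calibration_frame (width : Int) (height : Int) : String :=
  -- rows = [BORDER_CHAR * width]
  let rows : List (List Char) := [PySem.List.pyRepeat ['#'] width]
  -- for y in range(1, height-1): append central or normal row
  let rows := (PySem.List.pyRange 1 (height - 1) 1).foldl (fun rows y =>
      let row := if y == PySem.Int.floordiv height 2
        then ['#'] ++ PySem.List.pyRepeat ['+'] (width - 2) ++ ['#']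
        else ['#'] ++ PySem.List.pyRepeat ['█'] (width - 2) ++ ['#']
      rows ++ [row]) rows
  -- if height > 1: rows.append(BORDER_CHAR * width)
  let rows := if height > 1 then rows ++ [PySem.List.pyRepeat ['#'] width] else rows
  -- second loop: overwrite the vertical cross (rows[y][center_x] = '+')
  let center_x := PySem.Int.floordiv width 2
  let rows := (PySem.List.pyRange 1 (height - 1) 1).foldl (fun rows y =>
      if y != PySem.Int.floordiv height 2 then
        -- row_list = list(rows[y]); row_list[center_x] = '+'  (raises outside Pre_)
        PySem.List.pySetD rows y (PySem.List.pySetD (PySem.List.pyGetD rows y []) center_x '+')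
      else rows) rows
  String.ofList (PySem.Chars.join ['\n'] rows)

-- ===== PORT B =====
def generate_calibration_frame_alt (width : Int) (height : Int) : String :=
  let border := PySem.List.pyRepeat ['#'] width
  let cy := PySem.Int.floordiv height 2
  let cx := PySem.Int.floordiv width 2
  -- def interior(y): central row, or normal row with cells[cx] = '+' patched in while built
  let interior : Int → List Char := fun y =>
    if y == cy then ['#'] ++ PySem.List.pyRepeat ['+'] (width - 2) ++ ['#']
    else PySem.List.pySetD (['#'] ++ PySem.List.pyRepeat ['█'] (width - 2) ++ ['#']) cx '+'
  -- lines = [border] + [interior(y) for y in range(1, height-1)] + ([border] if height > 1 else [])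
  let lines := [border] ++ (PySem.List.pyRange 1 (height - 1) 1).map interior ++
    (if height > 1 then [border] else [])
  String.ofList (PySem.Chars.join ['\n'] lines)

-- ===== PRECONDITION & SPEC =====
-- Pre_ excludes exactly the inputs where A (and B alike) raises IndexError: the patch index
-- width//2 falls before the start of the 2-char degenerate interior row (width ≤ -5, height ≥ 4).
def Pre_generate_calibration_frame (width : Int) (height : Int) : Prop :=
  ¬ (width ≤ -5 ∧ 4 ≤ height)
instance (width : Int) (height : Int) : Decidable (Pre_generate_calibration_frame width height) := by unfold Pre_generate_calibration_frame; infer_instance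
def pvWitness_generate_calibration_frame : Int × Int := (5, 5)

def Spec_generate_calibration_frame (width : Int) (height : Int) (out : String) : Prop := out = generate_calibration_frame_alt width height
instance (width : Int) (height : Int) (out : String) : Decidable (Spec_generate_calibration_frame width height out) := by unfold Spec_generate_calibration_frame; infer_instance

-- ===== CLAIM =====
def Claim_equal_generate_calibration_frame : Prop := ∀ (width : Int) (height : Int), Dom_generate_calibration_frame width height → Pre_generate_calibration_frame width height → Spec_generate_calibration_frame width height (generate_calibration_frame width height)

-- ===== LEMMAS AND PROOFS =====

def pvCore (width : Int) : List Char := ['#'] ++ PySem.List.pyRepeat ['█'] (width - 2) ++ ['#']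
def pvCentral (width : Int) : List Char := ['#'] ++ PySem.List.pyRepeat ['+'] (width - 2) ++ ['#']
def pvPatch (width : Int) (r : List Char) : List Char :=
  PySem.List.pySetD r (PySem.Int.floordiv width 2) '+'

lemma pv_getD_append_cons {α : Type} (pre : List α) (x : α) (suf : List α) (d : α)
    (n : Nat) (h : n = pre.length) : (pre ++ x :: suf).getD n d = x := by
  subst h; simp [List.getD]

lemma pv_set_append_cons {α : Type} (pre : List α) (x : α) (suf : List α) (v : α)
    (n : Nat) (h : n = pre.length) : (pre ++ x :: suf).set n v = pre ++ v :: suf := by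
  subst h
  induction pre with
  | nil => simp
  | cons a t ih => simp [ih]

lemma pv_patchLoop_aux (width height : Int) (b : Int) : ∀ (n : Nat) (a : Int) (pre suf : List (List Char))
    (f : Int → List Char), 1 ≤ a → (pre.length : Int) = a → (b - a).toNat = n →
    (PySem.List.pyRange a b 1).foldl (fun rows y =>
      if y != PySem.Int.floordiv height 2 then
        PySem.List.pySetD rows y (PySem.List.pySetD (PySem.List.pyGetD rows y []) (PySem.Int.floordiv width 2) '+')
      else rows)
      (pre ++ (PySem.List.pyRange a b 1).map f ++ suf)
    = pre ++ (PySem.List.pyRange a b 1).map (fun y =>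
        if y = PySem.Int.floordiv height 2 then f y else pvPatch width (f y)) ++ suf := by
  intro n
  induction n with
  | zero =>
    intro a pre suf f ha hpre hn
    rw [PySem.List.pyRange_one_eq_nil (by omega)]
    simp
  | succ n ih =>
    intro a pre suf f ha hpre hn
    obtain ⟨m, rfl⟩ : ∃ m : Nat, a = (m : Int) := ⟨a.toNat, by omega⟩
    have hlen : pre.length = m := by omega
    have hab : (m : Int) < b := by omega
    rw [PySem.List.pyRange_one_cons hab]
    simp only [List.map_cons, List.foldl_cons, List.append_assoc, List.cons_append]
    set v := (if (m:Int) = PySem.Int.floordiv height 2 then f (m:Int) else pvPatch width (f (m:Int))) with hv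
    have hstep : (if ((m:Int) != PySem.Int.floordiv height 2) = true then
          PySem.List.pySetD (pre ++ f (m:Int) :: (List.map f (PySem.List.pyRange ((m:Int)+1) b 1) ++ suf)) (m:Int)
            (PySem.List.pySetD (PySem.List.pyGetD (pre ++ f (m:Int) :: (List.map f (PySem.List.pyRange ((m:Int)+1) b 1) ++ suf)) (m:Int) []) (PySem.Int.floordiv width 2) '+')
        else pre ++ f (m:Int) :: (List.map f (PySem.List.pyRange ((m:Int)+1) b 1) ++ suf)) = (pre ++ [v]) ++ (List.map f (PySem.List.pyRange ((m:Int)+1) b 1) ++ suf) := by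
      by_cases hc : (m:Int) = PySem.Int.floordiv height 2
      · simp [hc, hv]
      · rw [if_pos (by simpa using hc)]
        have hga : PySem.List.pyGetD (pre ++ f (m:Int) :: (List.map f (PySem.List.pyRange ((m:Int)+1) b 1) ++ suf)) (m:Int) [] = f (m:Int) := by
          rw [PySem.List.pyGetD_natCast]
          exact pv_getD_append_cons pre (f (m:Int)) _ [] m hlen.symm
        rw [hga, PySem.List.pySetD_natCast, pv_set_append_cons _ _ _ _ m hlen.symm,
          hv, if_neg hc]
        simp [pvPatch]
    rw [hstep, ← List.append_assoc (pre ++ [v]), ih ((m:Int)+1) (pre ++ [v]) suf f (by omega) (by simp; omega) (by omega)]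
    simp [hv]

lemma pv_a_rows (width height : Int) :
    generate_calibration_frame width height =
      String.ofList (PySem.Chars.join ['\n']
        ((PySem.List.pyRepeat ['#'] width :: (PySem.List.pyRange 1 (height - 1) 1).map (fun y =>
            if y = PySem.Int.floordiv height 2 then pvCentral width else pvPatch width (pvCore width))) ++
          (if height > 1 then [PySem.List.pyRepeat ['#'] width] else []))) := by
  unfold generate_calibration_frame
  simp only []
  have hbody : (fun (rows : List (List Char)) (y : Int) =>
      rows ++ [if y == PySem.Int.floordiv height 2
        then ['#'] ++ PySem.List.pyRepeat ['+'] (width - 2) ++ ['#']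
        else ['#'] ++ PySem.List.pyRepeat ['█'] (width - 2) ++ ['#']])
    = (fun rows y => rows ++ [if y = PySem.Int.floordiv height 2 then pvCentral width else pvCore width]) := by
    funext rows y
    simp only [beq_iff_eq]
    split_ifs with h <;> simp [pvCentral, pvCore]
  rw [hbody, PySem.List.foldl_append_singleton_eq_map]
  set f : Int → List Char := fun y => if y = PySem.Int.floordiv height 2 then pvCentral width else pvCore width with hf
  by_cases hh : height > 1
  · rw [if_pos hh]
    have := pv_patchLoop_aux width height (height - 1) (height - 1 - 1).toNat 1
      [PySem.List.pyRepeat ['#'] width] [PySem.List.pyRepeat ['#'] width] f (by omega) (by simp) rfl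
    simp only [List.singleton_append] at this ⊢
    rw [show (PySem.List.pyRepeat ['#'] width :: (PySem.List.pyRange 1 (height-1) 1).map f) ++ [PySem.List.pyRepeat ['#'] width]
        = PySem.List.pyRepeat ['#'] width :: (PySem.List.pyRange 1 (height-1) 1).map f ++ [PySem.List.pyRepeat ['#'] width] from by simp,
      this, if_pos hh]
    have hmap : List.map (fun y => if y = PySem.Int.floordiv height 2 then f y else pvPatch width (f y)) (PySem.List.pyRange 1 (height-1) 1)
        = List.map (fun y => if y = PySem.Int.floordiv height 2 then pvCentral width else pvPatch width (pvCore width)) (PySem.List.pyRange 1 (height-1) 1) := by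
      apply List.map_congr_left
      intro y _
      simp only [hf]
      split_ifs with h <;> rfl
    rw [hmap]
  · rw [if_neg hh]
    have := pv_patchLoop_aux width height (height - 1) (height - 1 - 1).toNat 1
      [PySem.List.pyRepeat ['#'] width] [] f (by omega) (by simp) rfl
    simp only [List.singleton_append, List.append_nil] at this ⊢
    rw [this, if_neg hh]
    have hmap : List.map (fun y => if y = PySem.Int.floordiv height 2 then f y else pvPatch width (f y)) (PySem.List.pyRange 1 (height-1) 1)
        = List.map (fun y => if y = PySem.Int.floordiv height 2 then pvCentral width else pvPatch width (pvCore width)) (PySem.List.pyRange 1 (height-1) 1) := by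
      apply List.map_congr_left
      intro y _
      simp only [hf]
      split_ifs with h <;> rfl
    rw [hmap]
    simp

lemma pv_alt_rows (width height : Int) :
    generate_calibration_frame_alt width height =
      String.ofList (PySem.Chars.join ['\n']
        ((PySem.List.pyRepeat ['#'] width :: (PySem.List.pyRange 1 (height - 1) 1).map (fun y =>
            if y = PySem.Int.floordiv height 2 then pvCentral width else pvPatch width (pvCore width))) ++
          (if height > 1 then [PySem.List.pyRepeat ['#'] width] else []))) := by
  unfold generate_calibration_frame_alt
  simp only []
  have hmap : List.map (fun y =>
        if (y == PySem.Int.floordiv height 2) = true then ['#'] ++ PySem.List.pyRepeat ['+'] (width - 2) ++ ['#']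
        else PySem.List.pySetD (['#'] ++ PySem.List.pyRepeat ['█'] (width - 2) ++ ['#']) (PySem.Int.floordiv width 2) '+')
      (PySem.List.pyRange 1 (height - 1) 1)
    = List.map (fun y => if y = PySem.Int.floordiv height 2 then pvCentral width else pvPatch width (pvCore width))
      (PySem.List.pyRange 1 (height - 1) 1) := by
    apply List.map_congr_left
    intro y _
    simp only [beq_iff_eq]
    split_ifs with h <;> simp [pvCentral, pvPatch, pvCore]
  rw [hmap]
  simp

-- ===== VERDICT =====
theorem generate_calibration_frame_spec : Claim_equal_generate_calibration_frame := by
  intro width height _ _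
  unfold Spec_generate_calibration_frame
  rw [pv_a_rows, pv_alt_rows]
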